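-- pv_equiv track=rewrite | github.com/SeyoungKo/Algorithm-ProblemSolving | array/count_the_number_of_consistent_strings.py | countConsistentStrings
-- ===== SOURCE A (Python) =====
-- def countConsistentStrings(allowed, words):
--     '''
--     :param allowed: string
--     :param words: list
--     :return: int
--     '''
--     allowed_list = list(set(allowed))
--     count = 0
--
--     for word in words:
--         for letter in word:
--             if letter not in allowed_list:
--                 count += 1
--                 break
--
--     return len(words) - count
-- ===== SOURCE B (Python) =====
-- def countConsistentStrings(allowed, words):
--     amask = 0
--     for ch in allowed:
--         amask |= 1 << ord(ch)
--     total = 0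
--     for word in words:
--         wmask = 0
--         for ch in word:
--             wmask |= 1 << ord(ch)
--         if wmask | amask == amask:
--             total += 1
--     return total
-- ===== Notes on version B (the rewrite author's own statement) =====
-- stated objective: alternative
-- what changed: B replaces A's per-character membership scan against list(set(allowed)) and its count-violations-then-subtract decomposition by bitmask arithmetic: one integer mask of allowed characters, each word folded into its own mask, consistency decided by a single bitwise OR test, counting positives directly.
import Mathlib
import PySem

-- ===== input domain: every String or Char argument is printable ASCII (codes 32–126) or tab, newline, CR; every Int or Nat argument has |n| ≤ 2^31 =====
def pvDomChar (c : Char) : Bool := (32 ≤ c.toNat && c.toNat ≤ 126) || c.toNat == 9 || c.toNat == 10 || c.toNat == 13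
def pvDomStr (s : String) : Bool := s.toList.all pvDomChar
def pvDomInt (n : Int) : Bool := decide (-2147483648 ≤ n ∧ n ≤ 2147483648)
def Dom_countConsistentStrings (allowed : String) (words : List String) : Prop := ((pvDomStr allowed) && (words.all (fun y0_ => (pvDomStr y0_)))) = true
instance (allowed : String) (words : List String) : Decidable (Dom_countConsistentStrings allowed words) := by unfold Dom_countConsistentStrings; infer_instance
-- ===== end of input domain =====

-- B replaces A's per-character membership scan and violations-then-subtract decomposition
-- by bitmask arithmetic (one allowed mask, per-word mask, one bitwise-OR test); objective: alternative.


-- ===== PORT A =====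
-- inner 'for letter in word: if letter not in allowed_list: count += 1; break'
def pvAWordLoop (allowedList : List Char) : List Char → Int → Int
  | [], count => count
  | c :: rest, count =>
      if allowedList.contains c then pvAWordLoop allowedList rest count
      else count + 1

def countConsistentStrings (allowed : String) (words : List String) : Int :=
  let allowedList : List Char := PySem.Set.ofList allowed.toList  -- list(set(allowed))
  let count : Int := words.foldl (fun count word => pvAWordLoop allowedList word.toList count) 0
  (words.length : Int) - count

-- ===== PORT B =====
-- 'm |= 1 << ord(ch)' over a string's characters
def pvMask (cs : List Char) : Nat := cs.foldl (fun m c => m ||| (1 <<< c.toNat)) 0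

def countConsistentStrings_alt (allowed : String) (words : List String) : Int :=
  let amask : Nat := pvMask allowed.toList
  words.foldl
    (fun total word =>
      let wmask : Nat := pvMask word.toList
      if wmask ||| amask = amask then total + 1 else total) 0

-- ===== PRECONDITION & SPEC =====
def Spec_countConsistentStrings (allowed : String) (words : List String) (out : Int) : Prop := out = countConsistentStrings_alt allowed words
instance (allowed : String) (words : List String) (out : Int) : Decidable (Spec_countConsistentStrings allowed words out) := by unfold Spec_countConsistentStrings; infer_instance

-- ===== CLAIM (what is proved, stated in full; the proofs are below) =====
def Claim_equal_countConsistentStrings : Prop := ∀ (allowed : String) (words : List String), Dom_countConsistentStrings allowed words → Spec_countConsistentStrings allowed words (countConsistentStrings allowed words)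

-- ===== LEMMAS AND PROOFS =====

-- generalized-accumulator bit characterization of pvMask's fold
theorem pvMask_fold_testBit (cs : List Char) (m : Nat) (i : Nat) :
    (cs.foldl (fun m c => m ||| (1 <<< c.toNat)) m).testBit i
      = (m.testBit i || cs.any (fun c => c.toNat == i)) := by
  induction cs generalizing m with
  | nil => simp
  | cons c rest ih =>
      simp only [List.foldl_cons, List.any_cons, ih, Nat.testBit_or]
      have : (1 <<< c.toNat) = 2 ^ c.toNat := by
        simp [Nat.shiftLeft_eq]
      rw [this, Nat.testBit_two_pow]
      by_cases h : c.toNat = i <;> simp [h, Bool.or_comm, Bool.or_left_comm]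

theorem pvMask_testBit (cs : List Char) (i : Nat) :
    (pvMask cs).testBit i = cs.any (fun c => c.toNat == i) := by
  simpa using pvMask_fold_testBit cs 0 i

-- Char.toNat is injective
theorem pv_char_toNat_inj {a b : Char} (h : a.toNat = b.toNat) : a = b := by
  apply Char.ext
  exact UInt32.toBitVec_inj.mp (BitVec.toNat_injective h)

-- B's mask test decides exactly A's all-chars-allowed condition
theorem pv_mask_test (allowed : String) (w : List Char) :
    (pvMask w ||| pvMask allowed.toList = pvMask allowed.toList)
      ↔ (w.all (fun c => List.contains (PySem.Set.ofList allowed.toList) c) = true) := by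
  constructor
  · intro h
    rw [List.all_eq_true]
    intro c hc
    have hb : (pvMask allowed.toList).testBit c.toNat = true := by
      have := congrArg (fun n => n.testBit c.toNat) h
      simp only [Nat.testBit_or] at this
      rw [← this]
      have : (pvMask w).testBit c.toNat = true := by
        rw [pvMask_testBit, List.any_eq_true]
        exact ⟨c, hc, by simp⟩
      simp [this]
    rw [pvMask_testBit, List.any_eq_true] at hb
    obtain ⟨c', hc', he⟩ := hb
    have : c' = c := pv_char_toNat_inj (by simpa using he)
    subst this
    simp [PySem.Set.mem_ofList]
    exact hc'
  · intro h
    apply Nat.eq_of_testBit_eq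
    intro i
    rw [Nat.testBit_or, pvMask_testBit, pvMask_testBit]
    rw [List.all_eq_true] at h
    by_cases hw : (w.any (fun c => c.toNat == i)) = true
    · rw [List.any_eq_true] at hw
      obtain ⟨c, hc, he⟩ := hw
      have hmem : c ∈ allowed.toList := by
        have := h c hc
        simpa [List.contains_iff_mem, PySem.Set.mem_ofList] using this
      have : (allowed.toList.any (fun c' => c'.toNat == i)) = true := by
        rw [List.any_eq_true]; exact ⟨c, hmem, he⟩
      simp [this]
    · have hw2 : (w.any (fun c => c.toNat == i)) = false := Bool.eq_false_iff.mpr hw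
      simp [hw2]

-- A's inner loop adds 1 exactly when some char of the word is not allowed
theorem pvAWordLoop_eq (L : List Char) (cs : List Char) (count : Int) :
    pvAWordLoop L cs count = count + (if cs.all (fun c => L.contains c) then 0 else 1) := by
  induction cs generalizing count with
  | nil => simp [pvAWordLoop]
  | cons c rest ih =>
      by_cases h : c ∈ L
      · simp [pvAWordLoop, h, ih]
      · simp [pvAWordLoop, h]

-- the two folds are complementary counts
theorem pv_combo (allowed : String) (words : List String) :
    ∀ (c a : Int),
      (words.foldl (fun count word => pvAWordLoop (PySem.Set.ofList allowed.toList) word.toList count) c)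
        + (words.foldl
            (fun total word =>
              if pvMask word.toList ||| pvMask allowed.toList = pvMask allowed.toList then total + 1 else total) a)
      = c + a + (words.length : Int) := by
  induction words with
  | nil => intro c a; simp
  | cons w ws ih =>
      intro c a
      simp only [List.foldl_cons, List.length_cons]
      rw [pvAWordLoop_eq]
      by_cases h : pvMask w.toList ||| pvMask allowed.toList = pvMask allowed.toList
      · have hall := (pv_mask_test allowed w.toList).mp h
        rw [if_pos hall, if_pos h, ih]
        push_cast
        ring
      · have hall : ¬ (w.toList.all (fun c => List.contains (PySem.Set.ofList allowed.toList) c) = true) :=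
          fun hc => h ((pv_mask_test allowed w.toList).mpr hc)
        rw [if_neg hall, if_neg h, ih]
        push_cast
        ring

-- ===== VERDICT (by name: the statement is the Claim_ definition above) =====
theorem countConsistentStrings_spec : Claim_equal_countConsistentStrings := by
  intro allowed words _
  show countConsistentStrings allowed words = countConsistentStrings_alt allowed words
  unfold countConsistentStrings countConsistentStrings_alt pvMask
  dsimp only
  have h := pv_combo allowed words 0 0
  unfold pvMask at h
  omega
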